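-- pv_equiv track=rewrite | github.com/jins408/Algorithm | programmers/dqueue.py | solution
-- ===== SOURCE A (Python) =====
-- from collections import deque
--
-- def solution(garden):
--     dx = [1, -1, 0, 0] ## 하상우좌 다 비교하기 위해
--     dy = [0, 0, 1, -1]
--
--     n = len(garden)
--     q = deque()
--     cnt = 0
--     for i in range(n):
--         for j in range(n):
--             if garden[i][j] == 1:
--                 q.append([i, j])
--                 cnt += 1
--     if cnt == n * n:
--         return 0
--
--     t = 0
--     while q:
--         t += 1
--         for _ in range(len(q)):
--             x, y = q.popleft()
--
--             for i in range(4):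
--                 nx, ny = x + dx[i], y + dy[i]
--                 if 0 <= nx < n and 0 <= ny < n and garden[nx][ny] == 0:
--                     q.append([nx, ny])
--                     garden[nx][ny] = 1
--                     cnt += 1
--                     if cnt == n * n:
--                         return t
-- ===== SOURCE B (Python) =====
-- def solution(garden):
--     # Round-synchronous grid dilation (cellular-automaton style): no queue; each
--     # round rebuilds the whole n*n grid by promoting every 0-cell with a filled
--     # neighbour, then compares counts. Equivalence is about the return value only
--     # (A mutates `garden` in place; B does not touch it).
--     n = len(garden)
--     g = [[garden[i][j] for j in range(n)] for i in range(n)]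
--     cnt = sum(1 for row in g for v in row if v == 1)
--     if cnt == n * n:
--         return 0
--     t = 0
--     while True:
--         new = [[1 if g[i][j] == 0 and (
--                     (i > 0 and g[i - 1][j] == 1) or
--                     (i + 1 < n and g[i + 1][j] == 1) or
--                     (j > 0 and g[i][j - 1] == 1) or
--                     (j + 1 < n and g[i][j + 1] == 1))
--                 else g[i][j] for j in range(n)] for i in range(n)]
--         t += 1
--         c = sum(1 for row in new for v in row if v == 1)
--         if c == n * n:
--             return t
--         if c == cnt:
--             return None
--         g, cnt = new, c
-- ===== Notes on version B (the rewrite author's own statement) =====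
-- stated objective: alternative
-- what changed: Replaces A's deque-based multi-source BFS (queue of frontier cells, per-round batch loop, in-place mutation of garden) by a queue-free cellular-automaton flood fill: each round rebuilds the whole n*n grid, promoting every 0-cell that has a 1-neighbour, and compares the 1-cell counts to decide full (return t), stalled (return None) or continue.
import Mathlib
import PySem

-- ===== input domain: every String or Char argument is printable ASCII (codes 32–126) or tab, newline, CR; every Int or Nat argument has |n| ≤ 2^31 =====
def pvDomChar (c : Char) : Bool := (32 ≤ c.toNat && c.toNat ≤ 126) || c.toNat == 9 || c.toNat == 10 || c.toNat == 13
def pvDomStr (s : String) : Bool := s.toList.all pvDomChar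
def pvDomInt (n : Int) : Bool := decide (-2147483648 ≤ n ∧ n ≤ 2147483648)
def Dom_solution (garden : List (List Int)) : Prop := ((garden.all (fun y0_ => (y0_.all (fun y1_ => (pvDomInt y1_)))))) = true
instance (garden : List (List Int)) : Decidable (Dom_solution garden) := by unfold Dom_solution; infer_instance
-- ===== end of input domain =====

-- B replaces A's queue-based BFS (deque of frontier cells, round batching, in-place mutation)
-- by a round-synchronous whole-grid dilation: each round rebuilds the n*n grid, promoting every
-- 0-cell with a filled neighbour, and compares cell counts (alternative algorithm, no queue).
-- A mutates `garden` in place; B does not — the equivalence proved is about the return value only.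
-- Both loop ports carry a fuel argument (n*n+2, one tick per round) solely to make the
-- while-loops total; the two ports consume it in lockstep.

-- ===== PORT A =====

-- garden[i][j] (reads are guarded in range wherever the ports look; exact there)
def getC (g : List (List Int)) (i j : Int) : Int :=
  (PySem.List.pyGet? ((PySem.List.pyGet? g i).getD []) j).getD 0
-- garden[i][j] = 1 (the write is guarded by an in-range check; exact there)
def setC (g : List (List Int)) (i j : Int) : List (List Int) :=
  g.modify i.toNat (fun r => r.set j.toNat 1)

-- the initial source scan (q.append([i, j]); cnt += 1)
def scanStepA (g : List (List Int)) (i : Int) (acc : List (Int × Int) × Int) (j : Int) :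
    List (Int × Int) × Int :=
  if getC g i j = 1 then (acc.1 ++ [(i, j)], acc.2 + 1) else acc

def scanA (g : List (List Int)) (n : Int) : List (Int × Int) × Int :=
  (PySem.List.pyRange 0 n 1).foldl
    (fun acc i => (PySem.List.pyRange 0 n 1).foldl (scanStepA g i) acc) ([], 0)

-- one neighbour step of A with nx, ny already computed; .inl = early `return t`
def stepAcore (n t nx ny : Int)
    (st : Option Int ⊕ (List (List Int) × List (Int × Int) × Int)) :
    Option Int ⊕ (List (List Int) × List (Int × Int) × Int) :=
  match st with
  | .inl r => .inl r
  | .inr (g, q, cnt) =>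
    if 0 ≤ nx ∧ nx < n ∧ 0 ≤ ny ∧ ny < n ∧ getC g nx ny = 0 then
      if cnt + 1 = n * n then .inl (some t)
      else .inr (setC g nx ny, q ++ [(nx, ny)], cnt + 1)
    else .inr (g, q, cnt)

def stepA (n x y t : Int)
    (st : Option Int ⊕ (List (List Int) × List (Int × Int) × Int)) (i : Int) :
    Option Int ⊕ (List (List Int) × List (Int × Int) × Int) :=
  stepAcore n t (x + (PySem.List.pyGet? ([1, -1, 0, 0] : List Int) i).getD 0)
               (y + (PySem.List.pyGet? ([0, 0, 1, -1] : List Int) i).getD 0) st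

-- the inner `for _ in range(len(q)):` batch of one round (m pops left)
def roundA (n t : Int) : Nat → List (List Int) → List (Int × Int) → Int →
    Option Int ⊕ (List (List Int) × List (Int × Int) × Int)
  | 0, g, q, cnt => .inr (g, q, cnt)
  | _ + 1, g, [], cnt => .inr (g, [], cnt)
  | m + 1, g, p :: rest, cnt =>
    match (PySem.List.pyRange 0 4 1).foldl (stepA n p.1 p.2 t) (.inr (g, rest, cnt)) with
    | .inl r => .inl r
    | .inr (g', q', c') => roundA n t m g' q' c'

-- A's `while q:` (one fuel tick per round)
def loopA (n : Int) : Nat → List (List Int) → List (Int × Int) → Int → Int → Option Int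
  | 0, _, _, _, _ => none
  | _ + 1, _, [], _, _ => none
  | f + 1, g, p :: rest, cnt, t =>
    match roundA n (t + 1) (p :: rest).length g (p :: rest) cnt with
    | .inl r => r
    | .inr (g', q', c') => loopA n f g' q' c' (t + 1)

def solution (garden : List (List Int)) : Option Int :=
  let n : Int := (garden.length : Int)
  let s := scanA garden n
  if s.2 = n * n then some 0
  else loopA n (garden.length * garden.length + 2) garden s.1 s.2 0

-- ===== PORT B =====

-- one cell of the dilated grid
def dilCell (g : List (List Int)) (n i j : Int) : Int :=
  if getC g i j = 0 ∧
      ((0 < i ∧ getC g (i - 1) j = 1) ∨ (i + 1 < n ∧ getC g (i + 1) j = 1) ∨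
       (0 < j ∧ getC g i (j - 1) = 1) ∨ (j + 1 < n ∧ getC g i (j + 1) = 1))
  then 1 else getC g i j

-- the whole-grid rebuild of one round
def dilate (g : List (List Int)) (n : Int) : List (List Int) :=
  (PySem.List.pyRange 0 n 1).map (fun i => (PySem.List.pyRange 0 n 1).map (dilCell g n i))

-- sum(1 for row in g for v in row if v == 1)
def count1 (g : List (List Int)) : Int :=
  g.foldl (fun a row => row.foldl (fun a v => if v = 1 then a + 1 else a) a) 0

-- the n*n working copy [[garden[i][j] for j in range(n)] for i in range(n)]
def copyG (garden : List (List Int)) (n : Int) : List (List Int) :=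
  (PySem.List.pyRange 0 n 1).map (fun i => (PySem.List.pyRange 0 n 1).map (fun j => getC garden i j))

-- B's `while True:` (one fuel tick per round)
def loopB (n : Int) : Nat → List (List Int) → Int → Int → Option Int
  | 0, _, _, _ => none
  | f + 1, g, cnt, t =>
    let g' := dilate g n
    let c := count1 g'
    if c = n * n then some (t + 1)
    else if c = cnt then none
    else loopB n f g' c (t + 1)

def solution_alt (garden : List (List Int)) : Option Int :=
  let n : Int := (garden.length : Int)
  let g := copyG garden n
  let cnt := count1 g
  if cnt = n * n then some 0
  else loopB n (garden.length * garden.length + 2) g cnt 0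

-- ===== PRECONDITION & SPEC =====
-- Pre_ excludes exactly the grids with a row shorter than len(garden), on which the Python A
-- raises IndexError reading garden[i][j] for j in range(n) (B raises there too).
def Pre_solution (garden : List (List Int)) : Prop :=
  ∀ r ∈ garden, garden.length ≤ r.length
instance (garden : List (List Int)) : Decidable (Pre_solution garden) := by
  unfold Pre_solution; infer_instance

def pvWitness_solution : List (List Int) := [[1, 0], [0, 0]]

def Spec_solution (garden : List (List Int)) (out : Option Int) : Prop := out = solution_alt garden
instance (garden : List (List Int)) (out : Option Int) : Decidable (Spec_solution garden out) := by
  unfold Spec_solution; infer_instance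

-- ===== CLAIM (what is proved, stated in full; the proofs are below) =====
def Claim_equal_solution : Prop := ∀ (garden : List (List Int)), Dom_solution garden → Pre_solution garden → Spec_solution garden (solution garden)

-- ===== LEMMAS AND PROOFS =====

-- the n*n window and its cells, function views of grids, and set-level invariants
def InW (N : Nat) (i j : Int) : Prop := 0 ≤ i ∧ i < (N : Int) ∧ 0 ≤ j ∧ j < (N : Int)

def nbrs (x y : Int) : List (Int × Int) := [(x + 1, y), (x - 1, y), (x, y + 1), (x, y - 1)]

def wcells (N : Nat) : List (Int × Int) :=
  PySem.List.pyRange 0 (N : Int) 1 ×ˢ PySem.List.pyRange 0 (N : Int) 1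

def ones (N : Nat) (f : Int → Int → Int) : List (Int × Int) :=
  (wcells N).filter (fun c => f c.1 c.2 == 1)

def card1 (N : Nat) (f : Int → Int → Int) : Nat := (ones N f).length

-- functional versions of one dilation round and of "grid after a list of fills"
def dilF (N : Nat) (f : Int → Int → Int) (i j : Int) : Int :=
  if f i j = 0 ∧
      ((0 < i ∧ f (i - 1) j = 1) ∨ (i + 1 < (N : Int) ∧ f (i + 1) j = 1) ∨
       (0 < j ∧ f i (j - 1) = 1) ∨ (j + 1 < (N : Int) ∧ f i (j + 1) = 1))
  then 1 else f i j

def fillF (f : Int → Int → Int) (S : List (Int × Int)) (i j : Int) : Int :=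
  if f i j = 0 ∧ (i, j) ∈ S then 1 else f i j

-- shape of A's mutable grid / B's rebuilt grids
def WFA (N : Nat) (g : List (List Int)) : Prop := g.length = N ∧ ∀ r ∈ g, N ≤ r.length
def WFB (N : Nat) (g : List (List Int)) : Prop := g.length = N ∧ ∀ r ∈ g, r.length = N

def MatchW (N : Nat) (g : List (List Int)) (f : Int → Int → Int) : Prop :=
  ∀ i j, InW N i j → getC g i j = f i j

-- frontier invariant at a round boundary: Q are distinct window 1-cells, and every
-- 1-cell not on the frontier has no 0-valued window neighbour
def FInv (N : Nat) (f : Int → Int → Int) (Q : List (Int × Int)) : Prop :=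
  Q.Nodup ∧ (∀ c ∈ Q, InW N c.1 c.2 ∧ f c.1 c.2 = 1) ∧
  (∀ c d : Int × Int, InW N c.1 c.2 → InW N d.1 d.2 → f c.1 c.2 = 1 → c ∉ Q →
    d ∈ nbrs c.1 c.2 → f d.1 d.2 ≠ 0)

-- mid-round state: f is the grid at the round's start, newQ the cells filled so far
def MidCore (N : Nat) (f : Int → Int → Int) (Q₀ newQ : List (Int × Int))
    (g : List (List Int)) (cnt : Int) : Prop :=
  MatchW N g (fillF f newQ) ∧ WFA N g ∧ newQ.Nodup ∧
  (∀ c ∈ newQ, InW N c.1 c.2 ∧ f c.1 c.2 = 0 ∧ ∃ p ∈ Q₀, c ∈ nbrs p.1 p.2) ∧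
  cnt = (card1 N f : Int) + newQ.length ∧ cnt < (N : Int) * N

-- completeness w.r.t. the already-processed prefix P of the frontier
def MidFull (N : Nat) (f : Int → Int → Int) (Q₀ P newQ : List (Int × Int))
    (g : List (List Int)) (cnt : Int) : Prop :=
  MidCore N f Q₀ newQ g cnt ∧
  (∀ c : Int × Int, InW N c.1 c.2 → f c.1 c.2 = 0 → (∃ p ∈ P, c ∈ nbrs p.1 p.2) → c ∈ newQ)

theorem mem_wcells (N : Nat) (c : Int × Int) : c ∈ wcells N ↔ InW N c.1 c.2 := by
  obtain ⟨a, b⟩ := c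
  simp only [wcells, List.mem_product, PySem.List.mem_pyRange_one, InW]
  tauto

theorem nodup_wcells (N : Nat) : (wcells N).Nodup := by
  exact List.Nodup.product (PySem.List.nodup_pyRange_one 0 _) (PySem.List.nodup_pyRange_one 0 _)

theorem length_wcells (N : Nat) : (wcells N).length = N * N := by
  simp [wcells, List.length_product, PySem.List.length_pyRange_one]

theorem card1_le (N : Nat) (f : Int → Int → Int) : card1 N f ≤ N * N := by
  calc card1 N f ≤ (wcells N).length := List.length_filter_le _ _
    _ = N * N := length_wcells N

theorem ones_congr (N : Nat) (f f' : Int → Int → Int)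
    (h : ∀ i j, InW N i j → f i j = f' i j) : ones N f = ones N f' := by
  unfold ones
  apply List.filter_congr
  intro c hc
  rw [h c.1 c.2 ((mem_wcells N c).1 hc)]

theorem card1_congr (N : Nat) (f f' : Int → Int → Int)
    (h : ∀ i j, InW N i j → f i j = f' i j) : card1 N f = card1 N f' := by
  unfold card1
  rw [ones_congr N f f' h]

-- |ones (fillF f S)| = |ones f| + |S| for distinct window 0-cells S
-- disjoint-or counting on a list
theorem countP_or_disjoint {α : Type} (l : List α) (p q : α → Bool)
    (h : ∀ x ∈ l, ¬(p x = true ∧ q x = true)) :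
    l.countP (fun x => p x || q x) = l.countP p + l.countP q := by
  induction l with
  | nil => simp
  | cons a l ih =>
    have ha := h a (List.mem_cons_self ..)
    have hl := fun x hx => h x (List.mem_cons_of_mem a hx)
    by_cases hpa : p a = true <;> by_cases hqa : q a = true
    · exact absurd ⟨hpa, hqa⟩ ha
    all_goals simp [hpa, hqa, ih hl] <;> omega

-- a nodup sublist-of-members is counted by its length
theorem countP_mem_eq_length {α : Type} (l S : List α) (p : α → Bool)
    (hp : ∀ x, p x = true ↔ x ∈ S)
    (hln : l.Nodup) (hSn : S.Nodup) (hsub : ∀ c ∈ S, c ∈ l) :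
    l.countP p = S.length := by
  rw [List.countP_eq_length_filter]
  have hperm : (l.filter p).Perm S := by
    apply (List.perm_ext_iff_of_nodup (List.Nodup.filter _ hln) hSn).mpr
    intro a
    simp only [List.mem_filter, hp]
    exact ⟨fun h => h.2, fun h => ⟨hsub a h, h⟩⟩
  exact hperm.length_eq

theorem card1_fill (N : Nat) (f : Int → Int → Int) (S : List (Int × Int))
    (hnd : S.Nodup) (hS : ∀ c ∈ S, InW N c.1 c.2 ∧ f c.1 c.2 = 0) :
    card1 N (fillF f S) = card1 N f + S.length := by
  unfold card1 ones
  rw [← List.countP_eq_length_filter, ← List.countP_eq_length_filter]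
  have hcong : (wcells N).countP (fun c => fillF f S c.1 c.2 == 1) =
      (wcells N).countP (fun c => (f c.1 c.2 == 1) || decide (c ∈ S)) := by
    apply List.countP_congr
    intro c hc
    by_cases hmem : c ∈ S
    · have := (hS c hmem).2
      simp [fillF, this, hmem]
    · simp only [fillF, hmem, and_false, if_false, Bool.or_eq_true, beq_iff_eq,
        decide_eq_true_eq, or_false]
  rw [hcong, countP_or_disjoint]
  · congr 1
    apply countP_mem_eq_length _ _ _ (fun x => by simp) (nodup_wcells N) hnd
    intro c hc
    exact (mem_wcells N c).2 (hS c hc).1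
  · intro c _ ⟨h1, h2⟩
    simp only [beq_iff_eq] at h1
    simp only [decide_eq_true_eq] at h2
    rw [(hS c h2).2] at h1
    exact absurd h1 (by norm_num)

theorem card1_mono (N : Nat) (f h : Int → Int → Int)
    (hmono : ∀ i j, InW N i j → f i j = 1 → h i j = 1) : card1 N f ≤ card1 N h := by
  unfold card1 ones
  rw [← List.countP_eq_length_filter, ← List.countP_eq_length_filter]
  apply List.countP_mono_left
  intro c hc hfc
  simp only [beq_iff_eq] at hfc ⊢
  exact hmono c.1 c.2 ((mem_wcells N c).1 hc) hfc

theorem fillF_nil (f : Int → Int → Int) (i j : Int) : fillF f [] i j = f i j := by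
  simp [fillF]

-- a filled cell is a dilation cell (members of newQ are 0-cells adjacent to the frontier)
theorem mem_nbrs (c p : Int × Int) : c ∈ nbrs p.1 p.2 ↔
    (c.1 = p.1 + 1 ∧ c.2 = p.2) ∨ (c.1 = p.1 - 1 ∧ c.2 = p.2) ∨
    (c.1 = p.1 ∧ c.2 = p.2 + 1) ∨ (c.1 = p.1 ∧ c.2 = p.2 - 1) := by
  obtain ⟨a, b⟩ := c
  simp [nbrs, Prod.ext_iff]

theorem dilF_of_one {N : Nat} {f : Int → Int → Int} {i j : Int} (h : f i j = 1) :
    dilF N f i j = 1 := by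
  simp [dilF, h]

-- the dilation raises exactly the 0-cells with a 1-neighbour in the window
theorem dilF_zero_iff (N : Nat) (f : Int → Int → Int) (i j : Int) (hW : InW N i j)
    (h0 : f i j = 0) : dilF N f i j = 1 ↔
      ∃ p : Int × Int, InW N p.1 p.2 ∧ f p.1 p.2 = 1 ∧ (i, j) ∈ nbrs p.1 p.2 := by
  obtain ⟨hi0, hiN, hj0, hjN⟩ := hW
  constructor
  · intro h1
    by_cases hg : (0 < i ∧ f (i - 1) j = 1) ∨ (i + 1 < (N : Int) ∧ f (i + 1) j = 1) ∨
        (0 < j ∧ f i (j - 1) = 1) ∨ (j + 1 < (N : Int) ∧ f i (j + 1) = 1)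
    · rcases hg with ⟨hb, h1'⟩ | ⟨hb, h1'⟩ | ⟨hb, h1'⟩ | ⟨hb, h1'⟩
      · exact ⟨(i - 1, j), ⟨by omega, by omega, hj0, hjN⟩, h1', by rw [mem_nbrs]; omega⟩
      · exact ⟨(i + 1, j), ⟨by omega, by omega, hj0, hjN⟩, h1', by rw [mem_nbrs]; omega⟩
      · exact ⟨(i, j - 1), ⟨hi0, hiN, by omega, by omega⟩, h1', by rw [mem_nbrs]; omega⟩
      · exact ⟨(i, j + 1), ⟨hi0, hiN, by omega, by omega⟩, h1', by rw [mem_nbrs]; omega⟩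
    · simp only [dilF] at h1
      rw [if_neg (by tauto), h0] at h1
      exact absurd h1 (by norm_num)
  · rintro ⟨⟨a, b⟩, ⟨ha0, haN, hb0, hbN⟩, hone, hmem⟩
    rw [mem_nbrs] at hmem
    simp only at hmem hone
    have hg : (0 < i ∧ f (i - 1) j = 1) ∨ (i + 1 < (N : Int) ∧ f (i + 1) j = 1) ∨
        (0 < j ∧ f i (j - 1) = 1) ∨ (j + 1 < (N : Int) ∧ f i (j + 1) = 1) := by
      rcases hmem with ⟨h1, h2⟩ | ⟨h1, h2⟩ | ⟨h1, h2⟩ | ⟨h1, h2⟩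
      · exact .inl ⟨by omega, by rw [show i - 1 = a by omega, show j = b by omega]; exact hone⟩
      · refine .inr (.inl ⟨by omega, ?_⟩)
        rw [show i + 1 = a by omega, show j = b by omega]; exact hone
      · refine .inr (.inr (.inl ⟨by omega, ?_⟩))
        rw [show j - 1 = b by omega, show i = a by omega]; exact hone
      · refine .inr (.inr (.inr ⟨by omega, ?_⟩))
        rw [show j + 1 = b by omega, show i = a by omega]; exact hone
    simp only [dilF]
    rw [if_pos ⟨h0, hg⟩]

theorem dilF_zero_of (N : Nat) (f : Int → Int → Int) (i j : Int)
    (h : dilF N f i j = 0) : f i j = 0 := by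
  by_cases h0 : f i j = 0
  · exact h0
  · simp only [dilF] at h
    rw [if_neg (by tauto)] at h
    exact h

theorem fill_le_dil (N : Nat) (f : Int → Int → Int) (Q₀ S : List (Int × Int))
    (hQ₀ : ∀ p ∈ Q₀, InW N p.1 p.2 ∧ f p.1 p.2 = 1)
    (hS : ∀ c ∈ S, InW N c.1 c.2 ∧ f c.1 c.2 = 0 ∧ ∃ p ∈ Q₀, c ∈ nbrs p.1 p.2) :
    ∀ i j, InW N i j → fillF f S i j = 1 → dilF N f i j = 1 := by
  intro i j hW h1
  by_cases h0 : f i j = 0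
  · simp only [fillF] at h1
    by_cases hmem : (i, j) ∈ S
    · obtain ⟨_, _, p, hpQ, hpn⟩ := hS _ hmem
      obtain ⟨hpW, hpone⟩ := hQ₀ _ hpQ
      exact (dilF_zero_iff N f i j hW h0).2 ⟨p, hpW, hpone, hpn⟩
    · rw [if_neg (by tauto)] at h1
      omega
  · simp only [fillF] at h1
    rw [if_neg (by tauto)] at h1
    exact dilF_of_one h1

-- with the frontier invariant and completeness, the round's fills are exactly the dilation
theorem dil_eq_fill (N : Nat) (f : Int → Int → Int) (Q₀ S : List (Int × Int))
    (hF : FInv N f Q₀)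
    (hS : ∀ c ∈ S, InW N c.1 c.2 ∧ f c.1 c.2 = 0 ∧ ∃ p ∈ Q₀, c ∈ nbrs p.1 p.2)
    (hcomp : ∀ c : Int × Int, InW N c.1 c.2 → f c.1 c.2 = 0 →
      (∃ p ∈ Q₀, c ∈ nbrs p.1 p.2) → c ∈ S) :
    ∀ i j, InW N i j → dilF N f i j = fillF f S i j := by
  intro i j hW
  obtain ⟨hnd, hmem1, hclo⟩ := hF
  by_cases h0 : f i j = 0
  · by_cases hd : dilF N f i j = 1
    · rw [hd]
      obtain ⟨p, hpW, hpone, hpn⟩ := (dilF_zero_iff N f i j hW h0).1 hd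
      have hpQ : p ∈ Q₀ := by
        by_contra hpQ
        exact hclo p (i, j) hpW hW hpone hpQ hpn h0
      have : (i, j) ∈ S := hcomp (i, j) hW h0 ⟨p, hpQ, hpn⟩
      simp only [fillF]
      rw [if_pos ⟨h0, this⟩]
    · have : dilF N f i j = f i j := by
        simp only [dilF]
        split
        · rename_i hg
          exact absurd (by simp only [dilF]; rw [if_pos hg]) hd
        · rfl
      rw [this, h0]
      simp only [fillF]
      rw [if_neg]
      · rw [h0]
      · rintro ⟨-, hmem⟩
        obtain ⟨_, _, p, hpQ, hpn⟩ := hS _ hmem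
        obtain ⟨hpW, hpone⟩ := hmem1 _ hpQ
        exact hd ((dilF_zero_iff N f i j hW h0).2 ⟨p, hpW, hpone, hpn⟩)
  · simp only [dilF, fillF]
    rw [if_neg (by tauto), if_neg (by tauto)]

-- the next round's frontier invariant
theorem FInv_next (N : Nat) (f : Int → Int → Int) (Q₀ S : List (Int × Int))
    (hF : FInv N f Q₀) (hnd : S.Nodup)
    (hS : ∀ c ∈ S, InW N c.1 c.2 ∧ f c.1 c.2 = 0 ∧ ∃ p ∈ Q₀, c ∈ nbrs p.1 p.2)
    (hcomp : ∀ c : Int × Int, InW N c.1 c.2 → f c.1 c.2 = 0 →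
      (∃ p ∈ Q₀, c ∈ nbrs p.1 p.2) → c ∈ S) :
    FInv N (dilF N f) S := by
  obtain ⟨hndQ, hmem1, hclo⟩ := hF
  refine ⟨hnd, ?_, ?_⟩
  · intro c hc
    obtain ⟨hW, h0, p, hpQ, hpn⟩ := hS c hc
    obtain ⟨hpW, hpone⟩ := hmem1 _ hpQ
    exact ⟨hW, (dilF_zero_iff N f c.1 c.2 hW h0).2 ⟨p, hpW, hpone, hpn⟩⟩
  · intro c d hcW hdW hcone hcS hdn hd0
    have hd0' : f d.1 d.2 = 0 := dilF_zero_of N f d.1 d.2 hd0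
    have hcone' : f c.1 c.2 = 1 := by
      by_cases h0 : f c.1 c.2 = 0
      · -- then c was filled this round, so c ∈ S — contradiction
        have := (dilF_zero_iff N f c.1 c.2 hcW h0).1 hcone
        obtain ⟨p, hpW, hpone, hpn⟩ := this
        have hpQ : p ∈ Q₀ := by
          by_contra hpQ
          exact hclo p c hpW hcW hpone hpQ hpn h0
        exact absurd (hcomp c hcW h0 ⟨p, hpQ, hpn⟩) hcS
      · simp only [dilF] at hcone
        rw [if_neg (by tauto)] at hcone
        exact hcone
    by_cases hcQ : c ∈ Q₀
    · -- d is a 0-neighbour of a frontier cell: it was filled, so dilF d = 1 ≠ 0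
      have : d ∈ S := hcomp d hdW hd0' ⟨c, hcQ, hdn⟩
      obtain ⟨_, _, p, hpQ, hpn⟩ := hS d this
      obtain ⟨hpW, hpone⟩ := hmem1 _ hpQ
      have := (dilF_zero_iff N f d.1 d.2 hdW hd0').2 ⟨p, hpW, hpone, hpn⟩
      omega
    · exact hclo c d hcW hdW hcone' hcQ hdn hd0'

-- getC of grids built as pyRange-map-of-pyRange-map
theorem getC_build (N : Nat) (F : Int → Int → Int) (i j : Int) (h : InW N i j) :
    getC ((PySem.List.pyRange 0 (N : Int) 1).map
      (fun i => (PySem.List.pyRange 0 (N : Int) 1).map (F i))) i j = F i j := by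
  obtain ⟨hi0, hiN, hj0, hjN⟩ := h
  have hi : i.toNat < N := by omega
  have hj : j.toNat < N := by omega
  have hi' : ((i.toNat : Int)) = i := Int.toNat_of_nonneg hi0
  have hj' : ((j.toNat : Int)) = j := Int.toNat_of_nonneg hj0
  unfold getC
  rw [PySem.List.pyGet?_of_nonneg _ hi0, PySem.List.getElem?_map_pyRange_zero _ _ _ hi]
  simp only [Option.getD_some]
  rw [PySem.List.pyGet?_of_nonneg _ hj0, PySem.List.getElem?_map_pyRange_zero _ _ _ hj]
  simp only [Option.getD_some, hi', hj']

theorem WFB_build (N : Nat) (F : Int → Int → Int) :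
    WFB N ((PySem.List.pyRange 0 (N : Int) 1).map
      (fun i => (PySem.List.pyRange 0 (N : Int) 1).map (F i))) := by
  constructor
  · simp [PySem.List.length_pyRange_one]
  · intro r hr
    obtain ⟨i, _, rfl⟩ := List.mem_map.1 hr
    simp [PySem.List.length_pyRange_one]

theorem getC_dilate (N : Nat) (g : List (List Int)) (i j : Int) (h : InW N i j) :
    getC (dilate g (N : Int)) i j = dilF N (getC g) i j := by
  rw [dilate, getC_build N (dilCell g (N : Int)) i j h]
  rfl

theorem getC_setC (N : Nat) (g : List (List Int)) (hwf : WFA N g) (x y i j : Int)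
    (hxy : InW N x y) (hij : InW N i j) :
    getC (setC g x y) i j = if i = x ∧ j = y then 1 else getC g i j := by
  obtain ⟨hlen, hrows⟩ := hwf
  obtain ⟨hx0, hxN, hy0, hyN⟩ := hxy
  obtain ⟨hi0, hiN, hj0, hjN⟩ := hij
  have hilen : i.toNat < g.length := by omega
  have hrowlen : N ≤ (g[i.toNat]).length := hrows _ (List.getElem_mem hilen)
  unfold getC setC
  rw [PySem.List.pyGet?_of_nonneg _ hi0, PySem.List.pyGet?_of_nonneg _ hi0,
    List.getElem?_modify, List.getElem?_eq_getElem hilen]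
  simp only [Option.map_eq_map, Option.map_some, Option.getD_some]
  by_cases hix : i = x
  · subst hix
    rw [if_pos rfl, PySem.List.pyGet?_of_nonneg _ hj0, PySem.List.pyGet?_of_nonneg _ hj0]
    by_cases hjy : j = y
    · subst hjy
      rw [List.getElem?_set_self (by omega), Option.getD_some, if_pos ⟨rfl, rfl⟩]
    · rw [List.getElem?_set_ne (by omega), if_neg (by tauto)]
  · rw [if_neg (by omega), if_neg (by tauto)]

theorem WFA_setC (N : Nat) (g : List (List Int)) (hwf : WFA N g) (x y : Int) :
    WFA N (setC g x y) := by
  obtain ⟨hlen, hrows⟩ := hwf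
  refine ⟨by rw [setC, List.length_modify, hlen], ?_⟩
  intro r hr
  obtain ⟨k, hk, rfl⟩ := List.mem_iff_getElem.1 hr
  simp only [setC] at hk ⊢
  rw [List.getElem_modify]
  split
  · rw [List.length_set]
    exact hrows _ (List.getElem_mem _)
  · exact hrows _ (List.getElem_mem _)

-- count1 of an exactly-N×N grid is its number of 1-cells
theorem count1_eq (N : Nat) (g : List (List Int)) (hwf : WFB N g) :
    count1 g = (card1 N (getC g) : Int) := by
  obtain ⟨hlen, hrows⟩ := hwf
  have hrow : ∀ (a : Int) (row : List Int),
      row.foldl (fun a v => if v = 1 then a + 1 else a) a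
        = a + (row.countP (fun v => v == 1) : Int) := by
    intro a row
    simpa using PySem.List.foldl_count_if (fun v : Int => v == 1) row a
  have h1 : count1 g = (g.map (fun row => (row.countP (fun v => v == 1) : Int))).sum := by
    unfold count1
    rw [show (fun (a : Int) (row : List Int) =>
          row.foldl (fun a v => if v = 1 then a + 1 else a) a)
        = (fun (a : Int) (row : List Int) => a + (row.countP (fun v => v == 1) : Int)) from
      funext fun a => funext fun row => hrow a row]
    rw [PySem.List.foldl_add g _ 0, zero_add]
  have h2 : card1 N (getC g)
      = ((PySem.List.pyRange 0 (N : Int) 1).map (fun i =>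
          (PySem.List.pyRange 0 (N : Int) 1).countP (fun j => getC g i j == 1))).sum := by
    unfold card1 ones wcells
    rw [show (PySem.List.pyRange 0 (N : Int) 1 ×ˢ PySem.List.pyRange 0 (N : Int) 1)
          = (PySem.List.pyRange 0 (N : Int) 1).flatMap
              (fun i => (PySem.List.pyRange 0 (N : Int) 1).map (fun j => (i, j))) from rfl]
    rw [List.filter_flatMap, List.length_flatMap]
    refine congrArg List.sum (List.map_congr_left ?_)
    intro i _
    simp only [List.filter_map, List.length_map, ← List.countP_eq_length_filter]
    rfl
  have h3 : ∀ i ∈ PySem.List.pyRange 0 (N : Int) 1,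
      (PySem.List.pyRange 0 (N : Int) 1).countP (fun j => getC g i j == 1)
        = (PySem.List.pyGetD g i []).countP (fun v => v == 1) := by
    intro i hi
    rw [PySem.List.mem_pyRange_one] at hi
    have hilen : i.toNat < g.length := by omega
    have hrowN : (PySem.List.pyGetD g i []).length = N := by
      have : PySem.List.pyGetD g i [] = g[i.toNat] := by
        show (PySem.List.pyGet? g i).getD [] = _
        rw [PySem.List.pyGet?_of_nonneg _ hi.1, List.getElem?_eq_getElem hilen,
          Option.getD_some]
      rw [this]
      exact hrows _ (List.getElem_mem hilen)
    conv_rhs => rw [← PySem.List.map_pyGetD_pyRange_zero' (PySem.List.pyGetD g i []) 0]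
    rw [List.countP_map, hrowN]
    rfl
  rw [h1, h2, Nat.cast_list_sum, List.map_map]
  conv_lhs => rw [show g = (PySem.List.pyRange 0 (g.length : Int) 1).map
      (fun i => PySem.List.pyGetD g i []) from
    (PySem.List.map_pyGetD_pyRange_zero' g []).symm, hlen]
  rw [List.map_map]
  refine congrArg List.sum (List.map_congr_left ?_)
  intro i hi
  simp only [Function.comp_apply]
  exact congrArg _ (h3 i hi).symm


-- the window 1-cells of one row, in scan order
def rowOnes (g : List (List Int)) (N : Nat) (i : Int) : List (Int × Int) :=
  ((PySem.List.pyRange 0 (N : Int) 1).filter (fun j => getC g i j == 1)).map (fun j => (i, j))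

theorem ones_eq_flatMap (g : List (List Int)) (N : Nat) :
    ones N (getC g) = (PySem.List.pyRange 0 (N : Int) 1).flatMap (rowOnes g N) := by
  unfold ones wcells rowOnes
  rw [show (PySem.List.pyRange 0 (N : Int) 1 ×ˢ PySem.List.pyRange 0 (N : Int) 1)
        = (PySem.List.pyRange 0 (N : Int) 1).flatMap
            (fun i => (PySem.List.pyRange 0 (N : Int) 1).map (fun j => (i, j))) from rfl]
  rw [List.filter_flatMap]
  apply List.flatMap_congr  -- may need adjusting
  intro i _
  rw [List.filter_map]
  rfl

theorem scan_inner (g : List (List Int)) (i : Int) (L : List Int) :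
    ∀ (l : List (Int × Int)) (c : Int),
      L.foldl (scanStepA g i) (l, c)
        = (l ++ (L.filter (fun j => getC g i j == 1)).map (fun j => (i, j)),
           c + ((L.filter (fun j => getC g i j == 1)).length : Int)) := by
  induction L with
  | nil => intro l c; simp
  | cons j L ih =>
    intro l c
    simp only [List.foldl_cons, scanStepA]
    by_cases hj : getC g i j = 1
    · rw [if_pos hj, ih, List.filter_cons_of_pos (by simp [hj])]
      refine Prod.ext ?_ ?_
      · simp [List.append_assoc]
      · simp only [List.length_cons]
        push_cast
        ring
    · rw [if_neg hj, ih, List.filter_cons_of_neg (by simp [hj])]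

-- the scan produces exactly the window 1-cells, row-major, with their count
theorem scanA_spec (g : List (List Int)) (N : Nat) :
    scanA g (N : Int) = (ones N (getC g), ((ones N (getC g)).length : Int)) := by
  unfold scanA
  rw [ones_eq_flatMap]
  suffices h : ∀ (L : List Int) (l : List (Int × Int)) (c : Int),
      L.foldl (fun acc i => (PySem.List.pyRange 0 (N : Int) 1).foldl (scanStepA g i) acc) (l, c)
        = (l ++ L.flatMap (rowOnes g N), c + ((L.flatMap (rowOnes g N)).length : Int)) by
    have := h (PySem.List.pyRange 0 (N : Int) 1) [] 0
    rw [this]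
    simp
  intro L
  induction L with
  | nil => intro l c; simp
  | cons i L ih =>
    intro l c
    simp only [List.foldl_cons]
    rw [scan_inner g i _ l c, ih, List.flatMap_cons]
    refine Prod.ext ?_ ?_
    · simp [rowOnes, List.append_assoc]
    · simp only [rowOnes, List.length_append, List.length_map]
      push_cast
      ring

-- the 4-iteration dx/dy fold is the fold over the four neighbour cells
theorem fold4_eq (n x y t : Int) (s : Option Int ⊕ (List (List Int) × List (Int × Int) × Int)) :
    (PySem.List.pyRange 0 4 1).foldl (stepA n x y t) s =
      (nbrs x y).foldl (fun s c => stepAcore n t c.1 c.2 s) s := by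
  have hr : PySem.List.pyRange 0 4 1 = [0, 1, 2, 3] := by decide
  rw [hr]
  simp only [List.foldl, stepA, nbrs]
  have e1 : ((PySem.List.pyGet? ([1, -1, 0, 0] : List Int) 0).getD 0) = 1 := by decide
  have e2 : ((PySem.List.pyGet? ([0, 0, 1, -1] : List Int) 0).getD 0) = 0 := by decide
  have e3 : ((PySem.List.pyGet? ([1, -1, 0, 0] : List Int) 1).getD 0) = -1 := by decide
  have e4 : ((PySem.List.pyGet? ([0, 0, 1, -1] : List Int) 1).getD 0) = 0 := by decide
  have e5 : ((PySem.List.pyGet? ([1, -1, 0, 0] : List Int) 2).getD 0) = 0 := by decide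
  have e6 : ((PySem.List.pyGet? ([0, 0, 1, -1] : List Int) 2).getD 0) = 1 := by decide
  have e7 : ((PySem.List.pyGet? ([1, -1, 0, 0] : List Int) 3).getD 0) = 0 := by decide
  have e8 : ((PySem.List.pyGet? ([0, 0, 1, -1] : List Int) 3).getD 0) = -1 := by decide
  rw [e1, e2, e3, e4, e5, e6, e7, e8]
  simp only [add_zero, Int.add_neg_one]

-- one neighbour step, from a coherent mid-round state
theorem step_one (N : Nat) (f : Int → Int → Int) (Q₀ : List (Int × Int)) (t : Int)
    (hQ₀ : ∀ p ∈ Q₀, InW N p.1 p.2 ∧ f p.1 p.2 = 1)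
    (a b : Int) (hab : ∃ p ∈ Q₀, (a, b) ∈ nbrs p.1 p.2)
    (R : List (Int × Int)) (g : List (List Int)) (newQ : List (Int × Int)) (cnt : Int)
    (h : MidCore N f Q₀ newQ g cnt) :
    (stepAcore (N : Int) t a b (.inr (g, R ++ newQ, cnt)) = .inl (some t) ∧
      card1 N (dilF N f) = N * N)
    ∨ ∃ g' newQ' cnt', stepAcore (N : Int) t a b (.inr (g, R ++ newQ, cnt)) =
        .inr (g', R ++ newQ', cnt') ∧ MidCore N f Q₀ newQ' g' cnt' ∧
        (∀ c ∈ newQ, c ∈ newQ') ∧ (InW N a b → f a b = 0 → (a, b) ∈ newQ') := by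
  obtain ⟨hmatch, hwf, hnd, hsound, hcnt, hlt⟩ := h
  simp only [stepAcore]
  by_cases hg : 0 ≤ a ∧ a < (N : Int) ∧ 0 ≤ b ∧ b < (N : Int) ∧ getC g a b = 0
  · rw [if_pos hg]
    have hW : InW N a b := ⟨hg.1, hg.2.1, hg.2.2.1, hg.2.2.2.1⟩
    have hfill : fillF f newQ a b = 0 := by rw [← hmatch a b hW]; exact hg.2.2.2.2
    have hnm : (a, b) ∉ newQ := by
      intro hmem
      have hf0 := (hsound _ hmem).2.1
      simp only [fillF] at hfill
      rw [if_pos ⟨hf0, hmem⟩] at hfill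
      exact absurd hfill (by norm_num)
    have hf0 : f a b = 0 := by
      simp only [fillF] at hfill
      rwa [if_neg (by tauto)] at hfill
    have hnd' : (newQ ++ [(a, b)]).Nodup := by
      rw [List.nodup_append]
      refine ⟨hnd, List.nodup_singleton _, ?_⟩
      intro u hu v hv
      rw [List.mem_singleton] at hv
      subst hv
      intro heq
      rw [heq] at hu
      exact hnm hu
    have hsound' : ∀ c ∈ newQ ++ [(a, b)],
        InW N c.1 c.2 ∧ f c.1 c.2 = 0 ∧ ∃ p ∈ Q₀, c ∈ nbrs p.1 p.2 := by
      intro c hc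
      rcases List.mem_append.1 hc with hc | hc
      · exact hsound c hc
      · rw [List.mem_singleton] at hc
        subst hc
        exact ⟨hW, hf0, hab⟩
    have hcard : card1 N (fillF f (newQ ++ [(a, b)])) = card1 N f + newQ.length + 1 := by
      rw [card1_fill N f _ hnd' (fun c hc => ⟨(hsound' c hc).1, (hsound' c hc).2.1⟩)]
      simp only [List.length_append, List.length_singleton]
      omega
    by_cases hret : cnt + 1 = (N : Int) * N
    · rw [if_pos hret]
      refine .inl ⟨rfl, ?_⟩
      have h1 : card1 N (fillF f (newQ ++ [(a, b)])) = N * N := by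
        have := hcnt
        omega
      have h2 : card1 N (fillF f (newQ ++ [(a, b)])) ≤ card1 N (dilF N f) :=
        card1_mono N _ _ (fill_le_dil N f Q₀ _ hQ₀ hsound')
      have h3 := card1_le N (dilF N f)
      omega
    · rw [if_neg hret]
      refine .inr ⟨setC g a b, newQ ++ [(a, b)], cnt + 1, ?_, ?_, ?_, ?_⟩
      · rw [List.append_assoc]
      · refine ⟨?_, WFA_setC N g hwf a b, hnd', hsound', ?_, ?_⟩
        · intro i j hij
          rw [getC_setC N g hwf a b i j hW hij]
          by_cases hijab : i = a ∧ j = b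
          · obtain ⟨rfl, rfl⟩ := hijab
            rw [if_pos ⟨rfl, rfl⟩]
            simp only [fillF]
            rw [if_pos ⟨hf0, by simp⟩]
          · rw [if_neg hijab, hmatch i j hij]
            simp only [fillF]
            have : ((i, j) ∈ newQ ++ [(a, b)]) ↔ (i, j) ∈ newQ := by
              simp only [List.mem_append, List.mem_singleton, Prod.mk.injEq]
              tauto
            rw [if_congr (and_congr_right fun _ => this.symm) rfl rfl]
        · simp only [List.length_append, List.length_singleton]
          push_cast
          omega
        · have hle := card1_le N (fillF f (newQ ++ [(a, b)]))
          have : cnt + 1 = (card1 N (fillF f (newQ ++ [(a, b)])) : Int) := by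
            rw [hcard]; push_cast; omega
          omega
      · intro c hc
        exact List.mem_append_left _ hc
      · intro _ _
        exact List.mem_append_right _ (List.mem_singleton.2 rfl)
  · rw [if_neg hg]
    refine .inr ⟨g, newQ, cnt, rfl, ⟨hmatch, hwf, hnd, hsound, hcnt, hlt⟩, fun c hc => hc, ?_⟩
    intro hW hf0
    by_contra hnm
    have : fillF f newQ a b = 0 := by
      simp only [fillF]
      rw [if_neg (by tauto)]
      exact hf0
    rw [← hmatch a b hW] at this
    obtain ⟨h1, h2, h3, h4⟩ := hW
    exact hg ⟨h1, h2, h3, h4, this⟩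

-- the early return propagates through the rest of a fold
theorem foldl_inl (L : List (Int × Int)) (n t : Int) (r : Option Int) :
    L.foldl (fun s c => stepAcore n t c.1 c.2 s) (.inl r) = .inl r := by
  induction L with
  | nil => rfl
  | cons c L ih => simpa [stepAcore] using ih

-- processing a list of neighbour candidates of frontier cells
theorem stepList (N : Nat) (f : Int → Int → Int) (Q₀ : List (Int × Int)) (t : Int)
    (hQ₀ : ∀ p ∈ Q₀, InW N p.1 p.2 ∧ f p.1 p.2 = 1) (L : List (Int × Int)) :
    ∀ (R : List (Int × Int)) (g : List (List Int)) (newQ : List (Int × Int)) (cnt : Int),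
      (∀ c ∈ L, ∃ p ∈ Q₀, c ∈ nbrs p.1 p.2) → MidCore N f Q₀ newQ g cnt →
      (L.foldl (fun s c => stepAcore (N : Int) t c.1 c.2 s) (.inr (g, R ++ newQ, cnt)) =
          .inl (some t) ∧ card1 N (dilF N f) = N * N)
      ∨ ∃ g' newQ' cnt',
          L.foldl (fun s c => stepAcore (N : Int) t c.1 c.2 s) (.inr (g, R ++ newQ, cnt)) =
            .inr (g', R ++ newQ', cnt') ∧ MidCore N f Q₀ newQ' g' cnt' ∧
          (∀ c ∈ newQ, c ∈ newQ') ∧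
          (∀ c ∈ L, InW N c.1 c.2 → f c.1 c.2 = 0 → c ∈ newQ') := by
  induction L with
  | nil =>
    intro R g newQ cnt _ h
    exact .inr ⟨g, newQ, cnt, rfl, h, fun c hc => hc, by simp⟩
  | cons c L ih =>
    intro R g newQ cnt hadj h
    rw [List.foldl_cons]
    rcases step_one N f Q₀ t hQ₀ c.1 c.2 (hadj c (List.mem_cons_self ..)) R g newQ cnt h with
      ⟨heq, hfull⟩ | ⟨g', newQ', cnt', heq, h', hsub, hcov⟩
    · rw [heq, foldl_inl]
      exact .inl ⟨rfl, hfull⟩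
    · rw [heq]
      rcases ih R g' newQ' cnt' (fun d hd => hadj d (List.mem_cons_of_mem c hd)) h' with
        ⟨heq2, hfull⟩ | ⟨g'', newQ'', cnt'', heq2, h'', hsub2, hcov2⟩
      · exact .inl ⟨heq2, hfull⟩
      · refine .inr ⟨g'', newQ'', cnt'', heq2, h'', fun d hd => hsub2 d (hsub d hd), ?_⟩
        intro d hd hW hf0
        rcases List.mem_cons.1 hd with rfl | hd
        · exact hsub2 d (hcov hW hf0)
        · exact hcov2 d hd hW hf0

theorem roundA_cons (n t : Int) (m : Nat) (g : List (List Int)) (p : Int × Int)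
    (rest : List (Int × Int)) (cnt : Int) :
    roundA n t (m + 1) g (p :: rest) cnt =
      (match (PySem.List.pyRange 0 4 1).foldl (stepA n p.1 p.2 t)
          (Sum.inr (g, rest, cnt)) with
        | Sum.inl r => (Sum.inl r : Option Int ⊕ (List (List Int) × List (Int × Int) × Int))
        | Sum.inr (g', q', c') => roundA n t m g' q' c') := rfl

-- a whole round of A
theorem roundA_run (N : Nat) (f : Int → Int → Int) (Q₀ : List (Int × Int)) (t : Int)
    (hQ₀ : ∀ p ∈ Q₀, InW N p.1 p.2 ∧ f p.1 p.2 = 1) :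
    ∀ (R P newQ : List (Int × Int)) (g : List (List Int)) (cnt : Int),
      Q₀ = P ++ R → MidFull N f Q₀ P newQ g cnt →
      (roundA (N : Int) t R.length g (R ++ newQ) cnt = .inl (some t) ∧
        card1 N (dilF N f) = N * N)
      ∨ ∃ g' newQ' cnt', roundA (N : Int) t R.length g (R ++ newQ) cnt = .inr (g', newQ', cnt') ∧
          MidFull N f Q₀ Q₀ newQ' g' cnt' := by
  intro R
  induction R with
  | nil =>
    intro P newQ g cnt hsplit hmid
    rw [List.append_nil] at hsplit
    subst hsplit
    exact .inr ⟨g, newQ, cnt, rfl, hmid⟩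
  | cons p R' ih =>
    intro P newQ g cnt hsplit hmid
    obtain ⟨hcore, hcomp⟩ := hmid
    simp only [List.length_cons, List.cons_append]
    rw [roundA_cons, fold4_eq]
    rcases stepList N f Q₀ t hQ₀ (nbrs p.1 p.2) R' g newQ cnt
        (fun c _ => ⟨p, by rw [hsplit]; simp, ‹c ∈ nbrs p.1 p.2›⟩) hcore with
      ⟨heq, hfull⟩ | ⟨g', newQ', cnt', heq, h', hsub, hcov⟩
    · rw [heq]
      exact .inl ⟨rfl, hfull⟩
    · rw [heq]
      refine ih (P ++ [p]) newQ' g' cnt' (by rw [hsplit, List.append_assoc]; rfl) ⟨h', ?_⟩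
      intro c hW hf0 ⟨q, hq, hcn⟩
      rcases List.mem_append.1 hq with hq | hq
      · exact hsub c (hcomp c hW hf0 ⟨q, hq, hcn⟩)
      · rw [List.mem_singleton] at hq
        subst hq
        exact hcov c hcn hW hf0

theorem FInv_congr (N : Nat) (f f' : Int → Int → Int) (Q : List (Int × Int))
    (h : ∀ i j, InW N i j → f i j = f' i j) (hF : FInv N f Q) : FInv N f' Q := by
  obtain ⟨hnd, hmem, hclo⟩ := hF
  refine ⟨hnd, ?_, ?_⟩
  · intro c hc
    obtain ⟨hW, h1⟩ := hmem c hc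
    exact ⟨hW, by rw [← h c.1 c.2 hW]; exact h1⟩
  · intro c d hcW hdW h1 hcQ hdn
    rw [← h c.1 c.2 hcW] at h1
    rw [← h d.1 d.2 hdW]
    exact hclo c d hcW hdW h1 hcQ hdn

-- without a frontier the dilation changes nothing
theorem dilF_fix (N : Nat) (f : Int → Int → Int) (hF : FInv N f []) :
    ∀ i j, InW N i j → dilF N f i j = f i j := by
  intro i j hW
  obtain ⟨-, -, hclo⟩ := hF
  by_cases h0 : f i j = 0
  · by_cases hd : dilF N f i j = 1
    · obtain ⟨p, hpW, hpone, hpn⟩ := (dilF_zero_iff N f i j hW h0).1 hd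
      exact absurd h0 (hclo p (i, j) hpW hW hpone (by simp) hpn)
    · simp only [dilF]
      split
      · rename_i hg
        exact absurd (by simp only [dilF]; rw [if_pos hg]) hd
      · rfl
  · simp only [dilF]
    rw [if_neg (by tauto)]

-- the two while-loops agree, in lockstep, one round per fuel tick
theorem loop_eq (N : Nat) : ∀ (fuel : Nat) (g h : List (List Int)) (Q : List (Int × Int))
    (cnt t : Int), WFA N g → WFB N h → MatchW N g (getC h) → FInv N (getC h) Q →
    cnt = (card1 N (getC h) : Int) → cnt < (N : Int) * N →
    loopA (N : Int) fuel g Q cnt t = loopB (N : Int) fuel h cnt t := by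
  intro fuel g h Q cnt t
  induction fuel generalizing g h Q cnt t with
  | zero => intro _ _ _ _ _ _; rfl
  | succ fu ih =>
    intro hwfA hwfB hmatch hF hcnt hlt
    have hdil : ∀ i j, InW N i j → getC (dilate h (N : Int)) i j = dilF N (getC h) i j :=
      fun i j hij => getC_dilate N h i j hij
    have hwfB' : WFB N (dilate h (N : Int)) := WFB_build N (dilCell h (N : Int))
    have hc' : count1 (dilate h (N : Int)) = (card1 N (dilF N (getC h)) : Int) := by
      rw [count1_eq N _ hwfB', card1_congr N _ _ hdil]
    have hB : loopB (N : Int) (fu + 1) h cnt t =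
        (if count1 (dilate h (N : Int)) = (N : Int) * N then some (t + 1)
         else if count1 (dilate h (N : Int)) = cnt then none
         else loopB (N : Int) fu (dilate h (N : Int)) (count1 (dilate h (N : Int))) (t + 1)) :=
      rfl
    obtain ⟨hndQ, hmemQ, hclo⟩ := hF
    match Q with
    | [] =>
      have hfix := dilF_fix N (getC h) ⟨hndQ, hmemQ, hclo⟩
      have hcc : count1 (dilate h (N : Int)) = cnt := by
        rw [hc', card1_congr N _ _ hfix, hcnt]
      show (none : Option Int) = _
      rw [hB, hcc, if_neg (ne_of_lt hlt), if_pos rfl]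
    | p :: R =>
      have hQ₀ : ∀ q ∈ p :: R, InW N q.1 q.2 ∧ getC h q.1 q.2 = 1 := hmemQ
      have hmid : MidFull N (getC h) (p :: R) [] [] g cnt := by
        refine ⟨⟨?_, hwfA, List.nodup_nil, by simp, by simpa using hcnt, hlt⟩, by simp⟩
        intro i j hij
        rw [fillF_nil]
        exact hmatch i j hij
      have hrun := roundA_run N (getC h) (p :: R) (t + 1) hQ₀ (p :: R) [] [] g cnt
        (by simp) hmid
      rw [List.append_nil] at hrun
      show (match roundA (N : Int) (t + 1) (p :: R).length g (p :: R) cnt with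
        | .inl r => r
        | .inr (g', q', c') => loopA (N : Int) fu g' q' c' (t + 1)) = _
      rw [hB]
      rcases hrun with ⟨heq, hfull⟩ | ⟨g', newQ', cnt', heq, ⟨hmatch', hwfA', hnd', hsound',
          hcnt', hlt'⟩, hcomp'⟩
      · rw [heq]
        rw [if_pos (by rw [hc', hfull]; push_cast; ring)]
      · rw [heq]
        have hfill : ∀ i j, InW N i j → dilF N (getC h) i j = fillF (getC h) newQ' i j :=
          dil_eq_fill N (getC h) (p :: R) newQ' ⟨hndQ, hmemQ, hclo⟩ hsound' hcomp'
        have hcard : card1 N (dilF N (getC h)) = card1 N (getC h) + newQ'.length := by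
          rw [card1_congr N _ _ hfill,
            card1_fill N _ _ hnd' (fun c hc => ⟨(hsound' c hc).1, (hsound' c hc).2.1⟩)]
        have hcint : count1 (dilate h (N : Int)) = cnt' := by
          rw [hc', hcard, hcnt']
          push_cast
          ring
        rw [hcint, if_neg (ne_of_lt hlt')]
        by_cases hemp : newQ' = []
        · subst hemp
          have : cnt' = cnt := by rw [hcnt', hcnt]; simp
          rw [if_pos this]
          cases fu <;> rfl
        · rw [if_neg ?_]
          · refine ih g' (dilate h (N : Int)) newQ' cnt' (t + 1) hwfA' hwfB' ?_ ?_ ?_ hlt'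
            · intro i j hij
              rw [hmatch' i j hij, ← hfill i j hij, ← hdil i j hij]
            · refine FInv_congr N (dilF N (getC h)) (getC (dilate h (N : Int))) newQ'
                (fun i j hij => (hdil i j hij).symm) ?_
              exact FInv_next N (getC h) (p :: R) newQ' ⟨hndQ, hmemQ, hclo⟩ hnd' hsound' hcomp'
            · rw [← hcint, hc', card1_congr N _ _ hdil]
          · rw [hcnt', hcnt]
            have := List.length_pos_iff.2 hemp
            omega

theorem getC_copyG (N : Nat) (garden : List (List Int)) (i j : Int) (h : InW N i j) :
    getC (copyG garden (N : Int)) i j = getC garden i j :=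
  getC_build N (fun i j => getC garden i j) i j h

-- ===== VERDICT (by name: the statement is the Claim_ definition above) =====
theorem solution_spec : Claim_equal_solution := by
  intro garden _ hpre
  show solution garden = solution_alt garden
  show (if (scanA garden (garden.length : Int)).2 = (garden.length : Int) * garden.length
      then some 0
      else loopA (garden.length : Int) (garden.length * garden.length + 2) garden
        (scanA garden (garden.length : Int)).1 (scanA garden (garden.length : Int)).2 0)
    = (if count1 (copyG garden (garden.length : Int)) = (garden.length : Int) * garden.length
      then some 0
      else loopB (garden.length : Int) (garden.length * garden.length + 2)
        (copyG garden (garden.length : Int)) (count1 (copyG garden (garden.length : Int))) 0)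
  have hb : count1 (copyG garden (garden.length : Int))
      = ((ones garden.length (getC garden)).length : Int) := by
    have hb1 := count1_eq garden.length (copyG garden (garden.length : Int))
      (WFB_build garden.length (fun i j => getC garden i j))
    rw [hb1,
      card1_congr garden.length _ _ (fun i j hij => getC_copyG garden.length garden i j hij)]
    rfl
  rw [scanA_spec garden garden.length, hb]
  dsimp only
  by_cases hg : ((ones garden.length (getC garden)).length : Int)
      = (garden.length : Int) * garden.length
  · rw [if_pos hg, if_pos hg]
  · rw [if_neg hg, if_neg hg]
    have hle : ((ones garden.length (getC garden)).length : Int)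
        ≤ (garden.length : Int) * garden.length := by
      calc ((ones garden.length (getC garden)).length : Int)
          ≤ ((garden.length * garden.length : Nat) : Int) := by
            exact_mod_cast card1_le garden.length (getC garden)
        _ = (garden.length : Int) * garden.length := by push_cast; ring
    refine loop_eq garden.length (garden.length * garden.length + 2) garden
      (copyG garden (garden.length : Int)) (ones garden.length (getC garden)) _ 0
      ⟨rfl, fun r hr => hpre r hr⟩ (WFB_build garden.length _) ?_ ?_ ?_
      (lt_of_le_of_ne hle hg)
    · intro i j hij
      exact (getC_copyG garden.length garden i j hij).symm
    · refine ⟨List.Nodup.filter _ (nodup_wcells _), ?_, ?_⟩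
      · intro c hc
        obtain ⟨hcw, hc1⟩ := List.mem_filter.1 hc
        have h1 : getC garden c.1 c.2 = 1 := by simpa using hc1
        have hW := (mem_wcells _ c).1 hcw
        exact ⟨hW, by rw [getC_copyG garden.length garden c.1 c.2 hW]; exact h1⟩
      · intro c d hcW hdW hc1 hcQ hdn
        exfalso
        apply hcQ
        rw [getC_copyG garden.length garden c.1 c.2 hcW] at hc1
        exact List.mem_filter.2 ⟨(mem_wcells _ c).2 hcW, by simpa using hc1⟩
    · rw [card1_congr garden.length _ _
        (fun i j hij => getC_copyG garden.length garden i j hij)]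
      rfl
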